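-- pv_equiv track=rewrite | github.com/junguk03/USW_MainProject | grw.py | solution
-- ===== SOURCE A (Python) =====
-- def solution(code):
--     mode = 0
--     ret = list()
--     for idx in range(len(code)):
--         if mode == 0:
--             if code[idx] != "1":
--                 if idx%2 == 0:
--                     ret.append(code[idx])
--             else:
--                 mode = 1
--         else:
--             if code[idx] != "1":
--                 if idx%2 != 0:
--                     ret.append(code[idx])
--             else:
--                 mode = 0
--     return ret
-- ===== SOURCE B (Python) =====
-- def solution(code):
--     # Phase 1: exclusive prefix-parity table: par[i] = parity of '1's in code[:i].
--     par = [0] * (len(code) + 1)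
--     for i, c in enumerate(code):
--         par[i + 1] = par[i] ^ (c == "1")
--     # Phase 2: stateless filter.
--     return [c for i, c in enumerate(code) if c != "1" and i % 2 == par[i]]
-- ===== Notes on version B (the rewrite author's own statement) =====
-- stated objective: alternative
-- what changed: Replaces A's single-pass state machine (a mode flag toggled inline while appending) with a two-phase design: first a precomputed exclusive prefix-parity table of '1'-occurrences, then a stateless filtering comprehension over enumerate(code).
import Mathlib
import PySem

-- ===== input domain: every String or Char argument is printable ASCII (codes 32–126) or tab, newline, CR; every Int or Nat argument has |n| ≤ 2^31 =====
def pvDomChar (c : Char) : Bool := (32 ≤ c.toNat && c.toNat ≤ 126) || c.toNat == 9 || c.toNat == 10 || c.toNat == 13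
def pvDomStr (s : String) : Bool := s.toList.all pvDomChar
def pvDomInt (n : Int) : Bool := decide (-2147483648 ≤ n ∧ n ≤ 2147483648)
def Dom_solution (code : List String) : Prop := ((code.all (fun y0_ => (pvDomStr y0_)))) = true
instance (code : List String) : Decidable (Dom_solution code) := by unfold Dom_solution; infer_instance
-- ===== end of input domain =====

-- B replaces A's inline mode toggle by a precomputed exclusive prefix-parity table plus a stateless
-- filtering pass (objective: alternative decomposition, same O(n) cost).

-- ===== PORT A =====
-- literal transliteration of A: index loop over range(len(code)) with a (mode, ret) state
def solution (code : List String) : List String :=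
  ((PySem.List.pyRange 0 (PySem.List.len code) 1).foldl
    (fun (st : Int × List String) idx =>
      if st.1 = 0 then
        if PySem.List.pyGetD code idx "" ≠ "1" then
          if PySem.Int.mod idx 2 = 0 then (st.1, st.2 ++ [PySem.List.pyGetD code idx ""]) else st
        else (1, st.2)
      else
        if PySem.List.pyGetD code idx "" ≠ "1" then
          if PySem.Int.mod idx 2 ≠ 0 then (st.1, st.2 ++ [PySem.List.pyGetD code idx ""]) else st
        else (0, st.2))
    ((0 : Int), ([] : List String))).2

-- ===== PORT B =====
-- transliteration of Source B: phase 1 builds the exclusive prefix-parity table (scanl = the par[] loop),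
-- phase 2 is the filtering comprehension over enumerate(code)
def solution_alt (code : List String) : List String :=
  let par : List Nat := code.scanl (fun p c => p ^^^ (if c = "1" then 1 else 0)) 0
  ((PySem.List.enumerate code 0).filter
      (fun q => decide (q.2 ≠ "1" ∧ PySem.Int.mod q.1 2 = ((par.getD q.1.toNat 0 : Nat) : Int)))).map
    (·.2)

-- ===== PRECONDITION & SPEC =====
def Spec_solution (code : List String) (out : List String) : Prop := out = solution_alt code
instance (code : List String) (out : List String) : Decidable (Spec_solution code out) := by unfold Spec_solution; infer_instance

-- ===== CLAIM (what is proved, stated in full; the proofs are below) =====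
def Claim_equal_solution : Prop := ∀ (code : List String), Dom_solution code → Spec_solution code (solution code)

-- ===== LEMMAS AND PROOFS =====

-- A's loop body on an (index, value) pair
def stepA (st : Int × List String) (q : Int × String) : Int × List String :=
  if st.1 = 0 then
    if q.2 ≠ "1" then
      if PySem.Int.mod q.1 2 = 0 then (st.1, st.2 ++ [q.2]) else st
    else (1, st.2)
  else
    if q.2 ≠ "1" then
      if PySem.Int.mod q.1 2 ≠ 0 then (st.1, st.2 ++ [q.2]) else st
    else (0, st.2)

-- the common description: keep (i, c) iff c ≠ "1" and i ≡ parity of '1's strictly before i (mod 2)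
def keep (code : List String) (q : Int × String) : Bool :=
  decide (q.2 ≠ "1" ∧ PySem.Int.mod q.1 2 = ((((code.take q.1.toNat).countP (fun c => decide (c = "1"))) % 2 : Nat) : Int))

def modeOf (code : List String) : Int := ((code.countP (fun c => decide (c = "1"))) % 2 : Nat)

def resOf (code : List String) : List String :=
  ((PySem.List.enumerate code 0).filter (keep code)).map (·.2)

theorem step_lemma (ret : List String) (n cnt : Nat) (x : String) :
    stepA ((((cnt % 2 : Nat)) : Int), ret) (((n : Nat) : Int), x)
      = ((((cnt + (if x = "1" then 1 else 0)) % 2 : Nat) : Int),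
         ret ++ (if x ≠ "1" ∧ n % 2 = cnt % 2 then [x] else [])) := by
  unfold stepA
  by_cases hx : x = "1" <;>
    rcases Nat.mod_two_eq_zero_or_one cnt with hc | hc <;>
    rcases Nat.mod_two_eq_zero_or_one n with hn | hn <;>
    simp [hx, hc, hn] <;> omega

theorem keep_append (xs : List String) (x : String) (q : Int × String) (hq : q ∈ PySem.List.enumerate xs 0) :
    keep (xs ++ [x]) q = keep xs q := by
  rcases (PySem.List.mem_enumerate_iff xs 0 q).1 hq with ⟨k, hk, rfl⟩
  simp only [keep]
  have ht : ((0 : Int) + (k : Int)).toNat = k := by omega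
  rw [ht, List.take_append_of_le_length (le_of_lt hk)]

theorem res_append (xs : List String) (x : String) :
    resOf (xs ++ [x]) = resOf xs ++
      (if x ≠ "1" ∧ xs.length % 2 = (xs.countP (fun c => decide (c = "1"))) % 2 then [x] else []) := by
  unfold resOf
  rw [PySem.List.enumerate_append]
  simp only [PySem.List.enumerate_cons, PySem.List.enumerate_nil]
  rw [List.filter_append, List.map_append]
  congr 1
  · exact congrArg _ (List.filter_congr (fun q hq => keep_append xs x q hq))
  · simp only [List.filter_cons, List.filter_nil]
    have h0 : ((0 : Int) + (xs.length : Int)) = ((xs.length : Nat) : Int) := by omega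
    rw [h0]
    simp only [keep, Int.toNat_natCast, List.take_left]
    by_cases hx : x = "1"
    · simp [hx]
    · by_cases hp : (xs.length : Nat) % 2 = (xs.countP (fun c => decide (c = "1"))) % 2
      · have hc2 : ((xs.length : Int)) % 2 = (((xs.countP (fun c => decide (c = "1"))) : Nat) : Int) % 2 := by
          omega
        simp [hx, hc2]
        exact hp
      · have hc2 : ¬ ((xs.length : Int)) % 2 = (((xs.countP (fun c => decide (c = "1"))) : Nat) : Int) % 2 := by
          omega
        simp [hx, hc2]
        exact hp

theorem main_inv : ∀ code : List String,
    (PySem.List.enumerate code 0).foldl stepA ((0 : Int), ([] : List String)) = (modeOf code, resOf code) := by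
  intro code
  induction code using List.reverseRecOn with
  | nil => rfl
  | append_singleton xs x ih =>
    rw [PySem.List.enumerate_append, List.foldl_append, ih]
    simp only [PySem.List.enumerate_cons, PySem.List.enumerate_nil, List.foldl_cons, List.foldl_nil]
    have hmode : modeOf (xs ++ [x])
        = ((((xs.countP (fun c => decide (c = "1"))) + (if x = "1" then 1 else 0)) % 2 : Nat) : Int) := by
      unfold modeOf
      rw [List.countP_append]
      norm_num [List.countP_cons]
    rw [hmode, res_append]
    have h0 : ((0 : Int) + (xs.length : Int)) = ((xs.length : Nat) : Int) := by omega
    rw [h0]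
    unfold modeOf
    exact step_lemma (resOf xs) xs.length (xs.countP (fun c => decide (c = "1"))) x

theorem a_eq : ∀ code, solution code = resOf code := by
  intro code
  have h : solution code = ((PySem.List.enumerate code 0).foldl stepA ((0 : Int), ([] : List String))).2 := by
    unfold solution
    rw [PySem.List.enumerate_eq_map_pyRange code "", List.foldl_map]
    rfl
  rw [h, main_inv]

theorem scanl_getD : ∀ (cs : List String) (p : Nat) (i : Nat), i ≤ cs.length →
    (cs.scanl (fun p c => p ^^^ (if c = "1" then 1 else 0)) p).getD i 0
      = p ^^^ (((cs.take i).countP (fun c => decide (c = "1"))) % 2) := by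
  intro cs
  induction cs with
  | nil =>
    intro p i hi
    have h0 : i = 0 := Nat.le_zero.mp hi
    subst h0
    simp [List.scanl_nil]
  | cons c cs ih =>
    intro p i hi
    cases i with
    | zero => simp [List.scanl_cons]
    | succ i =>
      rw [List.scanl_cons]
      simp only [List.getD_cons_succ, List.take_succ_cons, List.countP_cons]
      rw [ih (p ^^^ (if c = "1" then 1 else 0)) i (by simpa using hi)]
      by_cases hc : c = "1"
      · simp only [hc, decide_true, if_true]
        rw [Nat.xor_assoc]
        congr 1
        rcases Nat.mod_two_eq_zero_or_one ((cs.take i).countP (fun c => decide (c = "1"))) with h | h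
        · rw [h]
          have h1 : (List.countP (fun c => decide (c = "1")) (List.take i cs) + 1) % 2 = 1 := by omega
          rw [h1]
          decide
        · rw [h]
          have h1 : (List.countP (fun c => decide (c = "1")) (List.take i cs) + 1) % 2 = 0 := by omega
          rw [h1]
          decide
      · simp [hc]

theorem b_eq : ∀ code, solution_alt code = resOf code := by
  intro code
  have h : solution_alt code = ((PySem.List.enumerate code 0).filter
      (fun q => decide (q.2 ≠ "1" ∧ PySem.Int.mod q.1 2 =
        (((code.scanl (fun p c => p ^^^ (if c = "1" then 1 else 0)) 0).getD q.1.toNat 0 : Nat) : Int)))).map (·.2) := rfl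
  rw [h]
  unfold resOf
  refine congrArg _ (List.filter_congr (fun q hq => ?_))
  rcases (PySem.List.mem_enumerate_iff code 0 q).1 hq with ⟨k, hk, rfl⟩
  simp only [keep]
  have ht : ((0 : Int) + (k : Int)).toNat = k := by omega
  rw [ht, scanl_getD code 0 k (le_of_lt hk), Nat.zero_xor]

-- ===== VERDICT (by name: the statement is the Claim_ definition above) =====
theorem solution_spec : Claim_equal_solution := by
  intro code _
  unfold Spec_solution
  rw [a_eq, b_eq]
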